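-- pv_equiv track=rewrite | github.com/GregSQT/40k | ai/analyze_errors.py | is_adjacent_to_enemy
-- ===== SOURCE A (Python) =====
-- def is_adjacent_to_enemy(col, row, unit_player, unit_positions, unit_hp, player):
--     """Check if position is adjacent to enemy"""
--     enemy_player = 3 - player
--     for uid, pos in unit_positions.items():
--         p = unit_player.get(uid)
--         if p == enemy_player and unit_hp.get(uid, 0) > 0:
--             if abs(col - pos[0]) + abs(row - pos[1]) <= 1:  # Simplified adjacency
--                 return True
--     return False
-- ===== SOURCE B (Python) =====
-- def is_adjacent_to_enemy(col, row, unit_player, unit_positions, unit_hp, player):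
--     """Check if position is adjacent to enemy"""
--     enemy = 3 - player
--     live = set()
--     for uid, pos in unit_positions.items():
--         if unit_player.get(uid) == enemy and unit_hp.get(uid, 0) > 0:
--             live.add((pos[0], pos[1]))
--     return any(c in live for c in
--                ((col, row), (col + 1, row), (col - 1, row), (col, row + 1), (col, row - 1)))
-- ===== Notes on version B (the rewrite author's own statement) =====
-- stated objective: idiomatic
-- what changed: B first builds a set of the positions of live enemy units in one pass, then answers by membership tests of the five candidate cells, instead of computing a Manhattan-distance test per unit with early return.
import Mathlib
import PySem

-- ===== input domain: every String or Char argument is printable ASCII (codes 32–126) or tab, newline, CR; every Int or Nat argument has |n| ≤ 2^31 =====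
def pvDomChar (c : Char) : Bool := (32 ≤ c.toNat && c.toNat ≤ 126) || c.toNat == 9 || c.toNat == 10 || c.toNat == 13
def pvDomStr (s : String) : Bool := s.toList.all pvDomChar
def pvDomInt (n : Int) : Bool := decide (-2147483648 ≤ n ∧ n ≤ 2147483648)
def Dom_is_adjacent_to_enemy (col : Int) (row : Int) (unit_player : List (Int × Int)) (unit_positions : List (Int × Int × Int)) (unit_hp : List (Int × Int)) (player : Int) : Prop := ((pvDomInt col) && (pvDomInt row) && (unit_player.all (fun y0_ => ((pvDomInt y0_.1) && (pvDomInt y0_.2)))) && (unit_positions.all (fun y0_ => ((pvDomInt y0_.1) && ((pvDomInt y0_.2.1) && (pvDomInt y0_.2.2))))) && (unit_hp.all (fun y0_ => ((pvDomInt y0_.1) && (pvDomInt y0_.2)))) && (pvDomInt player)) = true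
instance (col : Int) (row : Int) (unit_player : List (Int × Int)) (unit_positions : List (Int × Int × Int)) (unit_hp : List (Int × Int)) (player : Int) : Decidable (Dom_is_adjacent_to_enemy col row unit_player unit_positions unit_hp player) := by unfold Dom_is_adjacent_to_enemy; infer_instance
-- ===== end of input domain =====

-- B builds the set of live enemy positions once, then tests the five adjacent cells by membership (idiomatic restructuring; same asymptotic cost).


-- ===== PORT A =====
def pyDictGet? (d : List (Int × Int)) (k : Int) : Option Int :=
  match d with
  | [] => none
  | (k', v) :: rest => if k' = k then some v else pyDictGet? rest k

def pyDictGetD (d : List (Int × Int)) (k : Int) (dflt : Int) : Int :=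
  (pyDictGet? d k).getD dflt

def pyAbs (n : Int) : Int := if n < 0 then -n else n

-- the for-loop of A: early return True on the first live enemy at Manhattan distance <= 1
def isAdjLoopA (col row : Int) (unit_player : List (Int × Int)) (unit_hp : List (Int × Int)) (enemy : Int) : List (Int × Int × Int) → Bool
  | [] => false
  | (uid, px, py) :: rest =>
    if pyDictGet? unit_player uid = some enemy ∧ pyDictGetD unit_hp uid 0 > 0 ∧ pyAbs (col - px) + pyAbs (row - py) ≤ 1 then
      true
    else
      isAdjLoopA col row unit_player unit_hp enemy rest

def is_adjacent_to_enemy (col : Int) (row : Int) (unit_player : List (Int × Int)) (unit_positions : List (Int × Int × Int)) (unit_hp : List (Int × Int)) (player : Int) : Bool :=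
  isAdjLoopA col row unit_player unit_hp (3 - player) unit_positions

-- ===== PORT B =====
-- B: one pass building the set of live enemy positions, then five membership tests
def liveEnemySet (unit_player : List (Int × Int)) (unit_hp : List (Int × Int)) (enemy : Int) (unit_positions : List (Int × Int × Int)) : PySem.Set (Int × Int) :=
  unit_positions.foldl
    (fun s e =>
      if pyDictGet? unit_player e.1 = some enemy ∧ pyDictGetD unit_hp e.1 0 > 0 then
        PySem.Set.add s (e.2.1, e.2.2)
      else s)
    PySem.Set.empty

def is_adjacent_to_enemy_alt (col : Int) (row : Int) (unit_player : List (Int × Int)) (unit_positions : List (Int × Int × Int)) (unit_hp : List (Int × Int)) (player : Int) : Bool :=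
  let live := liveEnemySet unit_player unit_hp (3 - player) unit_positions
  [(col, row), (col + 1, row), (col - 1, row), (col, row + 1), (col, row - 1)].any
    (fun c => PySem.Set.contains live c)

-- ===== PRECONDITION & SPEC =====
def Spec_is_adjacent_to_enemy (col : Int) (row : Int) (unit_player : List (Int × Int)) (unit_positions : List (Int × Int × Int)) (unit_hp : List (Int × Int)) (player : Int) (out : Bool) : Prop := out = is_adjacent_to_enemy_alt col row unit_player unit_positions unit_hp player
instance (col : Int) (row : Int) (unit_player : List (Int × Int)) (unit_positions : List (Int × Int × Int)) (unit_hp : List (Int × Int)) (player : Int) (out : Bool) : Decidable (Spec_is_adjacent_to_enemy col row unit_player unit_positions unit_hp player out) := by unfold Spec_is_adjacent_to_enemy; infer_instance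

-- ===== CLAIM (what is proved, stated in full; the proofs are below) =====
def Claim_equal_is_adjacent_to_enemy : Prop := ∀ (col : Int) (row : Int) (unit_player : List (Int × Int)) (unit_positions : List (Int × Int × Int)) (unit_hp : List (Int × Int)) (player : Int), Dom_is_adjacent_to_enemy col row unit_player unit_positions unit_hp player → Spec_is_adjacent_to_enemy col row unit_player unit_positions unit_hp player (is_adjacent_to_enemy col row unit_player unit_positions unit_hp player)

-- ===== LEMMAS AND PROOFS =====

theorem contains_add_eq (s : PySem.Set (Int × Int)) (x c : Int × Int) :
    PySem.Set.contains (PySem.Set.add s x) c = (PySem.Set.contains s c || c == x) := by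
  simp [PySem.Set.add, PySem.Set.contains]
  by_cases hx : x ∈ s <;> by_cases hc : c = x <;> simp [hx, hc]

theorem any_or_eq {α : Type} (L : List α) (p q : α → Bool) :
    L.any (fun c => p c || q c) = (L.any p || L.any q) := by
  induction L with
  | nil => simp
  | cons a t ih => simp only [List.any_cons, ih]; cases p a <;> cases q a <;> simp

theorem any5_eq_manh (col row px py : Int) :
    ([(col, row), (col + 1, row), (col - 1, row), (col, row + 1), (col, row - 1)].any
      (fun c => c == (px, py))) = decide (pyAbs (col - px) + pyAbs (row - py) ≤ 1) := by
  by_cases h : pyAbs (col - px) + pyAbs (row - py) ≤ 1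
  · rw [decide_eq_true h]
    simp only [List.any_cons, List.any_nil, Bool.or_false, Bool.or_eq_true, beq_iff_eq,
      Prod.mk.injEq]
    unfold pyAbs at h; split_ifs at h <;> omega
  · rw [decide_eq_false h]
    simp only [List.any_cons, List.any_nil, Bool.or_false, Bool.or_eq_false_iff,
      beq_eq_false_iff_ne, ne_eq, Prod.mk.injEq, not_and]
    unfold pyAbs at h
    refine ⟨?_, ?_, ?_, ?_, ?_⟩ <;> (intro h1; split_ifs at h <;> omega)

theorem any5_foldl (col row enemy : Int) (up uhp : List (Int × Int))
    (l : List (Int × Int × Int)) (s : PySem.Set (Int × Int)) :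
    ([(col, row), (col + 1, row), (col - 1, row), (col, row + 1), (col, row - 1)].any
      (fun c => PySem.Set.contains
        (l.foldl (fun s e =>
          if pyDictGet? up e.1 = some enemy ∧ pyDictGetD uhp e.1 0 > 0 then
            PySem.Set.add s (e.2.1, e.2.2)
          else s) s) c))
    = (([(col, row), (col + 1, row), (col - 1, row), (col, row + 1), (col, row - 1)].any
        (fun c => PySem.Set.contains s c)) || isAdjLoopA col row up uhp enemy l) := by
  induction l generalizing s with
  | nil => simp [isAdjLoopA]
  | cons e rest ih =>
    obtain ⟨uid, px, py⟩ := e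
    simp only [List.foldl_cons, isAdjLoopA]
    split_ifs with h1 h2 h2
    · rw [ih]
      simp only [contains_add_eq, any_or_eq, any5_eq_manh, decide_eq_true h2.2.2]
      simp
    · have hman : ¬ pyAbs (col - px) + pyAbs (row - py) ≤ 1 := fun hm => h2 ⟨h1.1, h1.2, hm⟩
      rw [ih]
      simp only [contains_add_eq, any_or_eq, any5_eq_manh, decide_eq_false hman]
      simp
    · exact absurd ⟨h2.1, h2.2.1⟩ h1
    · rw [ih]

-- ===== VERDICT (by name: the statement is the Claim_ definition above) =====
theorem is_adjacent_to_enemy_spec : Claim_equal_is_adjacent_to_enemy := by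
  intro col row up ups uhp player _
  unfold Spec_is_adjacent_to_enemy is_adjacent_to_enemy is_adjacent_to_enemy_alt liveEnemySet
  rw [any5_foldl]
  simp [PySem.Set.contains, PySem.Set.empty]
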